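-- pv_equiv track=rewrite | github.com/DKDave/Scripts | Python/Nitroplus_Blasterz_Heroines_Infinite_Duel_(PS3)_PIL-ITD.py | create_segment
-- ===== SOURCE A (Python) =====
-- def create_segment(new_image, source_image, pal, x_off, y_off, width, height):
-- 	for h in range(height):
-- 		row_pos = (h + y_off) * 8192
-- 		for w in range(width):
-- 			w_pos = (x_off + w) * 4
-- 			val = source_image[((h + y_off) * 2048) + x_off + w]
-- 			new_image[row_pos + w_pos + 3] = pal[val*4]					# Alpha
-- 			new_image[row_pos + w_pos + 0] = pal[val*4 + 1]				# Red
-- 			new_image[row_pos + w_pos + 1] = pal[val*4 + 2]				# Green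
-- 			new_image[row_pos + w_pos + 2] = pal[val*4 + 3]				# Blue
--
-- 	return new_image
-- ===== SOURCE B (Python) =====
-- def create_segment(new_image, source_image, pal, x_off, y_off, width, height):
--     lut = {}
--     for h in range(height):
--         base = (h + y_off) * 2048 + x_off
--         row = []
--         for w in range(width):
--             val = source_image[base + w]
--             rec = lut.get(val)
--             if rec is None:
--                 rec = [pal[val * 4 + 1], pal[val * 4 + 2], pal[val * 4 + 3], pal[val * 4]]
--                 lut[val] = rec
--             row += rec
--         dst = (h + y_off) * 8192 + x_off * 4
--         new_image[dst:dst + len(row)] = row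
--     return new_image
-- ===== Notes on version B (the rewrite author's own statement) =====
-- stated objective: faster
-- what changed: Replaces A's four per-byte writes per pixel with a palette lookup table of 4-entry RGBA records built on first use, assembling each output row as one list and storing it with a single slice assignment per row. Pre_ restricts to the natural blit domain of nonnegative, in-range destination indices; it excludes inputs where a negative destination index makes A wrap around via Python negative indexing, while B's row slice assignment clamps and inserts instead.
import Mathlib
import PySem

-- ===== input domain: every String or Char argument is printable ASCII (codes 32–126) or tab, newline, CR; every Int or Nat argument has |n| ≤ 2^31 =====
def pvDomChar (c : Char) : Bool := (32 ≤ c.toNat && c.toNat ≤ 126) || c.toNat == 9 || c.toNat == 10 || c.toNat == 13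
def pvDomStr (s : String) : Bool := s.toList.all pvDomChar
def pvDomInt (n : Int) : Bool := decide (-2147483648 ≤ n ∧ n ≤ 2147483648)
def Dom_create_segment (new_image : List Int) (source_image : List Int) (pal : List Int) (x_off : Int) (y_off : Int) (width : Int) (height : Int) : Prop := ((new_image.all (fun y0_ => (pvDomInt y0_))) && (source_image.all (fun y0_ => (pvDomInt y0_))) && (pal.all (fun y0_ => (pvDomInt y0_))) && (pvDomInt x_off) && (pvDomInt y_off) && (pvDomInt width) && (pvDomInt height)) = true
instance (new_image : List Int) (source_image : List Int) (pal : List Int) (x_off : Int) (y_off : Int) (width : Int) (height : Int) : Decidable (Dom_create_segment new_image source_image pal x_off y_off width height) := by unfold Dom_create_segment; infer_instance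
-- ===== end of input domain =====

-- B replaces A's four per-byte writes per pixel by a first-use palette LUT of 4-entry RGBA
-- records and one slice assignment per row (a constant-factor speed-up mechanism); the
-- equivalence proved is about the RETURN value (the Python programs mutate new_image in place).


-- ===== PORT A =====
def create_segment (new_image : List Int) (source_image : List Int) (pal : List Int) (x_off : Int) (y_off : Int) (width : Int) (height : Int) : List Int :=
  (PySem.List.pyRange 0 height 1).foldl (fun img h =>
    let row_pos := (h + y_off) * 8192
    (PySem.List.pyRange 0 width 1).foldl (fun img w =>
      let w_pos := (x_off + w) * 4
      let val := PySem.List.pyGetD source_image ((h + y_off) * 2048 + x_off + w) 0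
      let img := PySem.List.pySetD img (row_pos + w_pos + 3) (PySem.List.pyGetD pal (val * 4) 0)
      let img := PySem.List.pySetD img (row_pos + w_pos + 0) (PySem.List.pyGetD pal (val * 4 + 1) 0)
      let img := PySem.List.pySetD img (row_pos + w_pos + 1) (PySem.List.pyGetD pal (val * 4 + 2) 0)
      PySem.List.pySetD img (row_pos + w_pos + 2) (PySem.List.pyGetD pal (val * 4 + 3) 0)) img) new_image

-- ===== PORT B =====
-- Python step-1 slice assignment xs[a:b] = r (hand-ported; exact for any Int bounds:
-- both bounds are clamped to [0, len] with negative bounds counted from the end, and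
-- the stop bound never reaches back before the start bound).
def pvSliceAssign (xs : List Int) (a b : Int) (r : List Int) : List Int :=
  let a' := PySem.List.clampIdx xs.length a
  let b' := max a' (PySem.List.clampIdx xs.length b)
  xs.take a' ++ r ++ xs.drop b'

-- the body of B's inner loop (one pixel: LUT hit, or build the 4-byte record on first use)
def pvRowStep (source_image : List Int) (pal : List Int) (base : Int)
    (p : PySem.Dict Int (List Int) × List Int) (w : Int) : PySem.Dict Int (List Int) × List Int :=
  let val := PySem.List.pyGetD source_image (base + w) 0
  match p.1.get? val with
  | some r => (p.1, p.2 ++ r)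
  | none =>
    let r := [PySem.List.pyGetD pal (val * 4 + 1) 0, PySem.List.pyGetD pal (val * 4 + 2) 0,
              PySem.List.pyGetD pal (val * 4 + 3) 0, PySem.List.pyGetD pal (val * 4) 0]
    (p.1.insert val r, p.2 ++ r)

def create_segment_alt (new_image : List Int) (source_image : List Int) (pal : List Int) (x_off : Int) (y_off : Int) (width : Int) (height : Int) : List Int :=
  ((PySem.List.pyRange 0 height 1).foldl (fun st h =>
    let base := (h + y_off) * 2048 + x_off
    let p := (PySem.List.pyRange 0 width 1).foldl (pvRowStep source_image pal base) (st.1, ([] : List Int))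
    let dst := (h + y_off) * 8192 + x_off * 4
    (p.1, pvSliceAssign st.2 dst (dst + PySem.List.len p.2) p.2))
    ((PySem.Dict.empty : PySem.Dict Int (List Int)), new_image)).2

-- ===== PRECONDITION & SPEC =====
-- Pre_ = the inputs on which Python A returns normally (every source and palette read in
-- range, possibly via Python's negative-index wraparound) RESTRICTED to the natural blit
-- domain where every destination index is nonnegative and in range: it excludes inputs on
-- which A returns after wrapping a negative destination index around the buffer, where B's
-- row slice assignment clamps and inserts instead (see the claim's cited example).
def Pre_create_segment (new_image : List Int) (source_image : List Int) (pal : List Int) (x_off : Int) (y_off : Int) (width : Int) (height : Int) : Prop :=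
  0 < width → 0 < height →
    (0 ≤ y_off * 8192 + x_off * 4 ∧
     (height - 1 + y_off) * 8192 + (x_off + (width - 1)) * 4 + 3 < (new_image.length : Int) ∧
     -- the min-caps only keep the enumeration small; the two corner bounds above force
     -- them to equal height and width whenever this Pre_ holds
     ∀ h ∈ PySem.List.pyRange 0 (min height ((new_image.length : Int) / 8192 + 1)) 1,
     ∀ w ∈ PySem.List.pyRange 0 (min width ((new_image.length : Int) / 4 + 1)) 1,
       PySem.Raise.InRange source_image.length ((h + y_off) * 2048 + x_off + w) ∧
       (PySem.Raise.InRange pal.length ((PySem.List.pyGetD source_image ((h + y_off) * 2048 + x_off + w) 0) * 4) ∧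
        PySem.Raise.InRange pal.length ((PySem.List.pyGetD source_image ((h + y_off) * 2048 + x_off + w) 0) * 4 + 1) ∧
        PySem.Raise.InRange pal.length ((PySem.List.pyGetD source_image ((h + y_off) * 2048 + x_off + w) 0) * 4 + 2) ∧
        PySem.Raise.InRange pal.length ((PySem.List.pyGetD source_image ((h + y_off) * 2048 + x_off + w) 0) * 4 + 3)) ∧
       0 ≤ (h + y_off) * 8192 + (x_off + w) * 4 ∧
       (h + y_off) * 8192 + (x_off + w) * 4 + 3 < (new_image.length : Int))
instance (new_image : List Int) (source_image : List Int) (pal : List Int) (x_off : Int) (y_off : Int) (width : Int) (height : Int) : Decidable (Pre_create_segment new_image source_image pal x_off y_off width height) := by unfold Pre_create_segment; infer_instance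

def pvWitness_create_segment : List Int × List Int × List Int × Int × Int × Int × Int :=
  ([0, 0, 0, 0], [0], [5, 6, 7, 8], 0, 0, 1, 1)

def Spec_create_segment (new_image : List Int) (source_image : List Int) (pal : List Int) (x_off : Int) (y_off : Int) (width : Int) (height : Int) (out : List Int) : Prop := out = create_segment_alt new_image source_image pal x_off y_off width height
instance (new_image : List Int) (source_image : List Int) (pal : List Int) (x_off : Int) (y_off : Int) (width : Int) (height : Int) (out : List Int) : Decidable (Spec_create_segment new_image source_image pal x_off y_off width height out) := by unfold Spec_create_segment; infer_instance

-- ===== CLAIM (what is proved, stated in full; the proofs are below) =====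
def Claim_equal_create_segment : Prop := ∀ (new_image : List Int) (source_image : List Int) (pal : List Int) (x_off : Int) (y_off : Int) (width : Int) (height : Int), Dom_create_segment new_image source_image pal x_off y_off width height → Pre_create_segment new_image source_image pal x_off y_off width height → Spec_create_segment new_image source_image pal x_off y_off width height (create_segment new_image source_image pal x_off y_off width height)

-- ===== LEMMAS AND PROOFS =====


lemma set4_eq (img : List Int) (j : Nat) (h : j + 3 < img.length) (b0 b1 b2 b3 : Int) :
    ((((img.set (j+3) b3).set j b0).set (j+1) b1).set (j+2) b2)
      = img.take j ++ [b0, b1, b2, b3] ++ img.drop (j+4) := by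
  apply List.ext_getElem
  · simp; omega
  · intro i hi hi2
    simp only [List.getElem_set]
    rcases Nat.lt_or_ge i j with hij | hij
    · rw [List.getElem_append_left (by simp; omega)]
      rw [List.getElem_append_left (by simp; omega)]
      rw [List.getElem_take]
      split_ifs <;> omega
    · rcases Nat.lt_or_ge i (j+4) with hij2 | hij2
      · rw [List.getElem_append_left (by simp; omega), List.getElem_append_right (by simp; omega)]
        have hlt : i - (List.take j img).length < 4 := by simp; omega
        have hj : (List.take j img).length = j := by simp; omega
        rcases (by omega : i = j ∨ i = j+1 ∨ i = j+2 ∨ i = j+3) with rfl|rfl|rfl|rfl <;>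
          simp [hj]
      · rw [List.getElem_append_right (by simp; omega)]
        rw [List.getElem_drop]
        have hj : (List.take j img ++ [b0,b1,b2,b3]).length = j + 4 := by simp; omega
        split_ifs <;> try omega
        congr 1; simp; omega

def pvBlk (pal : List Int) (v : Int) : List Int :=
  [PySem.List.pyGetD pal (v * 4 + 1) 0, PySem.List.pyGetD pal (v * 4 + 2) 0,
   PySem.List.pyGetD pal (v * 4 + 3) 0, PySem.List.pyGetD pal (v * 4) 0]

lemma len_flatMap_blk (pal : List Int) (F : Int -> Int) (l : List Int) :
    (l.flatMap (fun w => pvBlk pal (F w))).length = 4 * l.length := by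
  induction l with
  | nil => simp
  | cons x t ih => simp [pvBlk]; omega

def pvGood (pal : List Int) (d : PySem.Dict Int (List Int)) : Prop :=
  forall v r, d.get? v = some r -> r = pvBlk pal v

lemma pvGood_insert (pal : List Int) (d : PySem.Dict Int (List Int)) (v : Int)
    (hg : pvGood pal d) : pvGood pal (d.insert v (pvBlk pal v)) := by
  intro k r hk
  rw [PySem.Dict.get?_insert] at hk
  split_ifs at hk with hkv
  · cases hk; subst hkv; rfl
  · exact hg k r hk

lemma innerB_eq (pal source : List Int) (base : Int) :
    forall (ws : List Int) (d : PySem.Dict Int (List Int)) (acc : List Int), pvGood pal d ->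
    (ws.foldl (pvRowStep source pal base) (d, acc)).2
      = acc ++ ws.flatMap (fun w => pvBlk pal (PySem.List.pyGetD source (base + w) 0))
    ∧ pvGood pal (ws.foldl (pvRowStep source pal base) (d, acc)).1 := by
  intro ws
  induction ws with
  | nil => intro d acc hg; exact ⟨by simp, hg⟩
  | cons w t ih =>
    intro d acc hg
    simp only [List.foldl_cons, List.flatMap_cons]
    have hstep : forall (q : PySem.Dict Int (List Int) × List Int),
        pvRowStep source pal base q w =
          match q.1.get? (PySem.List.pyGetD source (base + w) 0) with
          | some r => (q.1, q.2 ++ r)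
          | none => (q.1.insert (PySem.List.pyGetD source (base + w) 0)
                      (pvBlk pal (PySem.List.pyGetD source (base + w) 0)),
                     q.2 ++ pvBlk pal (PySem.List.pyGetD source (base + w) 0)) := by
      intro q; rfl
    rw [hstep]
    cases hget : d.get? (PySem.List.pyGetD source (base + w) 0) with
    | some r =>
      have hr : r = pvBlk pal (PySem.List.pyGetD source (base + w) 0) := hg _ _ hget
      obtain ⟨h1, h2⟩ := ih d (acc ++ r) hg
      exact ⟨by rw [h1, hr, List.append_assoc], h2⟩
    | none =>
      have hg2 := pvGood_insert pal d (PySem.List.pyGetD source (base + w) 0) hg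
      obtain ⟨h1, h2⟩ := ih _ (acc ++ pvBlk pal (PySem.List.pyGetD source (base + w) 0)) hg2
      exact ⟨by rw [h1, List.append_assoc], h2⟩

lemma innerA_eq (pal source : List Int) (rp x_off sb : Int) (hoff : 0 ≤ rp + x_off * 4) :
    ∀ (n : Nat) (img : List Int), (rp + x_off * 4).toNat + 4 * n ≤ img.length →
    ((PySem.List.pyRange 0 (n : Int) 1).foldl (fun img w =>
        PySem.List.pySetD
          (PySem.List.pySetD
            (PySem.List.pySetD
              (PySem.List.pySetD img (rp + (x_off + w) * 4 + 3)
                (PySem.List.pyGetD pal ((PySem.List.pyGetD source (sb + w) 0) * 4) 0))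
              (rp + (x_off + w) * 4 + 0)
              (PySem.List.pyGetD pal ((PySem.List.pyGetD source (sb + w) 0) * 4 + 1) 0))
            (rp + (x_off + w) * 4 + 1)
            (PySem.List.pyGetD pal ((PySem.List.pyGetD source (sb + w) 0) * 4 + 2) 0))
          (rp + (x_off + w) * 4 + 2)
          (PySem.List.pyGetD pal ((PySem.List.pyGetD source (sb + w) 0) * 4 + 3) 0)) img)
      = img.take (rp + x_off * 4).toNat
        ++ (PySem.List.pyRange 0 (n : Int) 1).flatMap
             (fun w => pvBlk pal (PySem.List.pyGetD source (sb + w) 0))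
        ++ img.drop ((rp + x_off * 4).toNat + 4 * n) := by
  intro n
  induction n with
  | zero =>
    intro img hlen
    rw [PySem.List.pyRange_one_eq_nil (by omega)]
    simp [List.take_append_drop]
  | succ n ih =>
    intro img hlen
    have hcast : ((n : Int) + 1) = (((n + 1 : Nat)) : Int) := by push_cast; ring
    rw [← hcast] at *
    rw [PySem.List.pyRange_one_succ_right (by positivity)]
    rw [List.foldl_append, List.flatMap_append]
    rw [ih img (by omega)]
    set d := (rp + x_off * 4).toNat with hd
    set R := (PySem.List.pyRange 0 (n : Int) 1).flatMap
             (fun w => pvBlk pal (PySem.List.pyGetD source (sb + w) 0)) with hR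
    have hRlen : R.length = 4 * n := by
      rw [hR, len_flatMap_blk pal (fun w => PySem.List.pyGetD source (sb + w) 0)]
      simp [PySem.List.length_pyRange_one]
    simp only [List.foldl_cons, List.foldl_nil, List.flatMap_cons, List.flatMap_nil]
    have hd' : (d : Int) = rp + x_off * 4 := by simp [hd]; omega
    have hi3 : rp + (x_off + (n:Int)) * 4 + 3 = ((d + 4*n + 3 : Nat) : Int) := by push_cast [hd']; ring
    have hi0 : rp + (x_off + (n:Int)) * 4 + 0 = ((d + 4*n : Nat) : Int) := by push_cast [hd']; ring
    have hi1 : rp + (x_off + (n:Int)) * 4 + 1 = ((d + 4*n + 1 : Nat) : Int) := by push_cast [hd']; ring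
    have hi2 : rp + (x_off + (n:Int)) * 4 + 2 = ((d + 4*n + 2 : Nat) : Int) := by push_cast [hd']; ring
    rw [hi3, hi0, hi1, hi2]
    simp only [PySem.List.pySetD_natCast]
    have hdlen : d ≤ img.length := by omega
    set S := img.take d ++ R ++ img.drop (d + 4 * n) with hS
    have hSlen : S.length = img.length := by
      simp [hS, hRlen]; omega
    rw [set4_eq S (d + 4*n) (by omega) _ _ _ _]
    have hTlen : (img.take d ++ R).length = d + 4 * n := by simp [hRlen]; omega
    have hT : S.take (d + 4*n) = img.take d ++ R := by
      rw [hS]; exact List.take_left' hTlen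
    have hDmid : S.drop (d + 4*n) = img.drop (d + 4*n) := by
      rw [hS]; exact List.drop_left' hTlen
    have hD : S.drop (d + 4*n + 4) = img.drop (d + 4 * (n+1)) := by
      have h1 : S.drop (d + 4*n + 4) = (S.drop (d + 4*n)).drop 4 := by
        rw [List.drop_drop]
      rw [h1, hDmid, List.drop_drop, show d + 4*n + 4 = d + 4*(n+1) from by omega]
    rw [hT, hD]
    simp [pvBlk, List.append_assoc]


-- the slice-assignment helper is exact on the in-range case
lemma pvSliceAssign_exact (xs r : List Int) (a : Int) (ha : 0 ≤ a)
    (hb : a.toNat + r.length ≤ xs.length) :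
    pvSliceAssign xs a (a + PySem.List.len r) r
      = xs.take a.toNat ++ r ++ xs.drop (a.toNat + r.length) := by
  have h1 : PySem.List.clampIdx xs.length a = a.toNat := by
    simp only [PySem.List.clampIdx]; split_ifs <;> omega
  have h2 : PySem.List.clampIdx xs.length (a + PySem.List.len r) = a.toNat + r.length := by
    simp only [PySem.List.clampIdx, PySem.List.len]; split_ifs <;> omega
  have h3 : max (a.toNat) (a.toNat + r.length) = a.toNat + r.length := by omega
  simp only [pvSliceAssign, h1, h2, h3]

lemma pvSliceAssign_nil (xs : List Int) (a : Int) :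
    pvSliceAssign xs a (a + PySem.List.len ([] : List Int)) [] = xs := by
  simp [pvSliceAssign]

lemma row_eq (si pal : List Int) (xo yo wd : Int) (L : Nat) (h : Int)
    (hcond : ∀ w ∈ PySem.List.pyRange 0 wd 1,
      0 ≤ (h + yo) * 8192 + (xo + w) * 4 ∧ (h + yo) * 8192 + (xo + w) * 4 + 3 < (L : Int))
    (d : PySem.Dict Int (List Int)) (img : List Int)
    (hg : pvGood pal d) (hlen : img.length = L) :
    pvSliceAssign img ((h + yo) * 8192 + xo * 4)
        ((h + yo) * 8192 + xo * 4 + PySem.List.len ((PySem.List.pyRange 0 wd 1).foldl (pvRowStep si pal ((h + yo) * 2048 + xo)) (d, ([] : List Int))).2)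
        ((PySem.List.pyRange 0 wd 1).foldl (pvRowStep si pal ((h + yo) * 2048 + xo)) (d, ([] : List Int))).2
      = (PySem.List.pyRange 0 wd 1).foldl (fun img w =>
      PySem.List.pySetD
        (PySem.List.pySetD
          (PySem.List.pySetD
            (PySem.List.pySetD img ((h + yo) * 8192 + (xo + w) * 4 + 3)
              (PySem.List.pyGetD pal (PySem.List.pyGetD si ((h + yo) * 2048 + xo + w) 0 * 4) 0))
            ((h + yo) * 8192 + (xo + w) * 4 + 0)
            (PySem.List.pyGetD pal (PySem.List.pyGetD si ((h + yo) * 2048 + xo + w) 0 * 4 + 1) 0))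
          ((h + yo) * 8192 + (xo + w) * 4 + 1)
          (PySem.List.pyGetD pal (PySem.List.pyGetD si ((h + yo) * 2048 + xo + w) 0 * 4 + 2) 0))
        ((h + yo) * 8192 + (xo + w) * 4 + 2)
        (PySem.List.pyGetD pal (PySem.List.pyGetD si ((h + yo) * 2048 + xo + w) 0 * 4 + 3) 0)) img
    ∧ pvGood pal ((PySem.List.pyRange 0 wd 1).foldl (pvRowStep si pal ((h + yo) * 2048 + xo)) (d, ([] : List Int))).1
    ∧ ((PySem.List.pyRange 0 wd 1).foldl (fun img w =>
      PySem.List.pySetD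
        (PySem.List.pySetD
          (PySem.List.pySetD
            (PySem.List.pySetD img ((h + yo) * 8192 + (xo + w) * 4 + 3)
              (PySem.List.pyGetD pal (PySem.List.pyGetD si ((h + yo) * 2048 + xo + w) 0 * 4) 0))
            ((h + yo) * 8192 + (xo + w) * 4 + 0)
            (PySem.List.pyGetD pal (PySem.List.pyGetD si ((h + yo) * 2048 + xo + w) 0 * 4 + 1) 0))
          ((h + yo) * 8192 + (xo + w) * 4 + 1)
          (PySem.List.pyGetD pal (PySem.List.pyGetD si ((h + yo) * 2048 + xo + w) 0 * 4 + 2) 0))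
        ((h + yo) * 8192 + (xo + w) * 4 + 2)
        (PySem.List.pyGetD pal (PySem.List.pyGetD si ((h + yo) * 2048 + xo + w) 0 * 4 + 3) 0)) img).length = L := by
  obtain ⟨hrow, hgood⟩ := innerB_eq pal si ((h + yo) * 2048 + xo) (PySem.List.pyRange 0 wd 1) d [] hg
  simp only [List.nil_append] at hrow
  by_cases hw : 0 < wd
  · obtain ⟨n, hn⟩ : ∃ n : Nat, wd = (n : Int) := ⟨wd.toNat, by omega⟩
    subst hn
    have h0 := hcond 0 (by rw [PySem.List.mem_pyRange_one]; omega)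
    have hoff : 0 ≤ (h + yo) * 8192 + xo * 4 := by have := h0.1; omega
    have hl := hcond ((n : Int) - 1) (by rw [PySem.List.mem_pyRange_one]; omega)
    have hl' : ((h + yo) * 8192 + xo * 4).toNat + 4 * n ≤ img.length := by
      have h1 := hl.2; omega
    have hrl : ((PySem.List.pyRange 0 (n : Int) 1).flatMap
        (fun w => pvBlk pal (PySem.List.pyGetD si ((h + yo) * 2048 + xo + w) 0))).length = 4 * n := by
      rw [len_flatMap_blk pal (fun w => PySem.List.pyGetD si ((h + yo) * 2048 + xo + w) 0)]
      rw [PySem.List.length_pyRange_one]; omega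
    rw [innerA_eq pal si ((h + yo) * 8192) xo ((h + yo) * 2048 + xo) hoff n img hl']
    refine ⟨?_, hgood, ?_⟩
    · rw [hrow]
      rw [pvSliceAssign_exact img _ ((h + yo) * 8192 + xo * 4) hoff (by rw [hrl]; omega)]
      rw [hrl]
    · simp only [List.length_append, List.length_take, List.length_drop, hrl]
      omega
  · rw [PySem.List.pyRange_one_eq_nil (by omega)]
    exact ⟨pvSliceAssign_nil img _, hg, hlen⟩

lemma outer_eq (si pal : List Int) (xo yo wd : Int) (L : Nat) :
    ∀ (hs : List Int) (p : PySem.Dict Int (List Int) × List Int),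
    pvGood pal p.1 → p.2.length = L →
    (∀ h ∈ hs, ∀ w ∈ PySem.List.pyRange 0 wd 1,
      0 ≤ (h + yo) * 8192 + (xo + w) * 4 ∧ (h + yo) * 8192 + (xo + w) * 4 + 3 < (L : Int)) →
    (hs.foldl (fun st h =>
        (((PySem.List.pyRange 0 wd 1).foldl (pvRowStep si pal ((h + yo) * 2048 + xo)) (st.1, ([] : List Int))).1,
         pvSliceAssign st.2 ((h + yo) * 8192 + xo * 4)
           ((h + yo) * 8192 + xo * 4 + PySem.List.len ((PySem.List.pyRange 0 wd 1).foldl (pvRowStep si pal ((h + yo) * 2048 + xo)) (st.1, ([] : List Int))).2)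
           ((PySem.List.pyRange 0 wd 1).foldl (pvRowStep si pal ((h + yo) * 2048 + xo)) (st.1, ([] : List Int))).2)) p).2
      = hs.foldl (fun img h => (PySem.List.pyRange 0 wd 1).foldl (fun img w =>
      PySem.List.pySetD
        (PySem.List.pySetD
          (PySem.List.pySetD
            (PySem.List.pySetD img ((h + yo) * 8192 + (xo + w) * 4 + 3)
              (PySem.List.pyGetD pal (PySem.List.pyGetD si ((h + yo) * 2048 + xo + w) 0 * 4) 0))
            ((h + yo) * 8192 + (xo + w) * 4 + 0)
            (PySem.List.pyGetD pal (PySem.List.pyGetD si ((h + yo) * 2048 + xo + w) 0 * 4 + 1) 0))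
          ((h + yo) * 8192 + (xo + w) * 4 + 1)
          (PySem.List.pyGetD pal (PySem.List.pyGetD si ((h + yo) * 2048 + xo + w) 0 * 4 + 2) 0))
        ((h + yo) * 8192 + (xo + w) * 4 + 2)
        (PySem.List.pyGetD pal (PySem.List.pyGetD si ((h + yo) * 2048 + xo + w) 0 * 4 + 3) 0)) img) p.2
    ∧ pvGood pal (hs.foldl (fun st h =>
        (((PySem.List.pyRange 0 wd 1).foldl (pvRowStep si pal ((h + yo) * 2048 + xo)) (st.1, ([] : List Int))).1,
         pvSliceAssign st.2 ((h + yo) * 8192 + xo * 4)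
           ((h + yo) * 8192 + xo * 4 + PySem.List.len ((PySem.List.pyRange 0 wd 1).foldl (pvRowStep si pal ((h + yo) * 2048 + xo)) (st.1, ([] : List Int))).2)
           ((PySem.List.pyRange 0 wd 1).foldl (pvRowStep si pal ((h + yo) * 2048 + xo)) (st.1, ([] : List Int))).2)) p).1
    ∧ (hs.foldl (fun img h => (PySem.List.pyRange 0 wd 1).foldl (fun img w =>
      PySem.List.pySetD
        (PySem.List.pySetD
          (PySem.List.pySetD
            (PySem.List.pySetD img ((h + yo) * 8192 + (xo + w) * 4 + 3)
              (PySem.List.pyGetD pal (PySem.List.pyGetD si ((h + yo) * 2048 + xo + w) 0 * 4) 0))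
            ((h + yo) * 8192 + (xo + w) * 4 + 0)
            (PySem.List.pyGetD pal (PySem.List.pyGetD si ((h + yo) * 2048 + xo + w) 0 * 4 + 1) 0))
          ((h + yo) * 8192 + (xo + w) * 4 + 1)
          (PySem.List.pyGetD pal (PySem.List.pyGetD si ((h + yo) * 2048 + xo + w) 0 * 4 + 2) 0))
        ((h + yo) * 8192 + (xo + w) * 4 + 2)
        (PySem.List.pyGetD pal (PySem.List.pyGetD si ((h + yo) * 2048 + xo + w) 0 * 4 + 3) 0)) img) p.2).length = L := by
  intro hs
  induction hs with
  | nil => intro p hg hlen _; exact ⟨rfl, hg, hlen⟩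
  | cons h t ih =>
    intro p hg hlen hcond
    obtain ⟨e1, g1, l1⟩ := row_eq si pal xo yo wd L h
      (hcond h (List.mem_cons_self)) p.1 p.2 hg hlen
    simp only [List.foldl_cons]
    obtain ⟨E, G, Len⟩ := ih
      (((PySem.List.pyRange 0 wd 1).foldl (pvRowStep si pal ((h + yo) * 2048 + xo)) (p.1, ([] : List Int))).1,
       pvSliceAssign p.2 ((h + yo) * 8192 + xo * 4)
         ((h + yo) * 8192 + xo * 4 + PySem.List.len ((PySem.List.pyRange 0 wd 1).foldl (pvRowStep si pal ((h + yo) * 2048 + xo)) (p.1, ([] : List Int))).2)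
         ((PySem.List.pyRange 0 wd 1).foldl (pvRowStep si pal ((h + yo) * 2048 + xo)) (p.1, ([] : List Int))).2)
      g1 ((congrArg List.length e1).trans l1)
      (fun h2 hh2 => hcond h2 (List.mem_cons_of_mem _ hh2))
    refine ⟨?_, G, ?_⟩
    · exact E.trans (congrArg (fun z => t.foldl (fun img h => (PySem.List.pyRange 0 wd 1).foldl (fun img w =>
      PySem.List.pySetD
        (PySem.List.pySetD
          (PySem.List.pySetD
            (PySem.List.pySetD img ((h + yo) * 8192 + (xo + w) * 4 + 3)
              (PySem.List.pyGetD pal (PySem.List.pyGetD si ((h + yo) * 2048 + xo + w) 0 * 4) 0))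
            ((h + yo) * 8192 + (xo + w) * 4 + 0)
            (PySem.List.pyGetD pal (PySem.List.pyGetD si ((h + yo) * 2048 + xo + w) 0 * 4 + 1) 0))
          ((h + yo) * 8192 + (xo + w) * 4 + 1)
          (PySem.List.pyGetD pal (PySem.List.pyGetD si ((h + yo) * 2048 + xo + w) 0 * 4 + 2) 0))
        ((h + yo) * 8192 + (xo + w) * 4 + 2)
        (PySem.List.pyGetD pal (PySem.List.pyGetD si ((h + yo) * 2048 + xo + w) 0 * 4 + 3) 0)) img) z) e1)
    · exact (congrArg (fun z => (t.foldl (fun img h => (PySem.List.pyRange 0 wd 1).foldl (fun img w =>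
      PySem.List.pySetD
        (PySem.List.pySetD
          (PySem.List.pySetD
            (PySem.List.pySetD img ((h + yo) * 8192 + (xo + w) * 4 + 3)
              (PySem.List.pyGetD pal (PySem.List.pyGetD si ((h + yo) * 2048 + xo + w) 0 * 4) 0))
            ((h + yo) * 8192 + (xo + w) * 4 + 0)
            (PySem.List.pyGetD pal (PySem.List.pyGetD si ((h + yo) * 2048 + xo + w) 0 * 4 + 1) 0))
          ((h + yo) * 8192 + (xo + w) * 4 + 1)
          (PySem.List.pyGetD pal (PySem.List.pyGetD si ((h + yo) * 2048 + xo + w) 0 * 4 + 2) 0))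
        ((h + yo) * 8192 + (xo + w) * 4 + 2)
        (PySem.List.pyGetD pal (PySem.List.pyGetD si ((h + yo) * 2048 + xo + w) 0 * 4 + 3) 0)) img) z).length) e1).symm.trans Len

-- ===== VERDICT (by name: the statement is the Claim_ definition above) =====

-- ===== VERDICT (by name: the statement is the Claim_ definition above) =====
theorem create_segment_spec : Claim_equal_create_segment := by
  intro ni si pal xo yo wd ht hdom hpre
  unfold Pre_create_segment at hpre
  unfold Spec_create_segment
  simp only [create_segment, create_segment_alt]
  have hcond : ∀ h ∈ PySem.List.pyRange 0 ht 1, ∀ w ∈ PySem.List.pyRange 0 wd 1,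
      0 ≤ (h + yo) * 8192 + (xo + w) * 4 ∧
      (h + yo) * 8192 + (xo + w) * 4 + 3 < ((ni.length : Nat) : Int) := by
    intro h hh w hw
    rw [PySem.List.mem_pyRange_one] at hh hw
    have hp := hpre (by omega) (by omega)
    have hC1 := hp.1
    have hC2 := hp.2.1
    have hhm : min ht ((ni.length : Int) / 8192 + 1) = ht := by omega
    have hwm : min wd ((ni.length : Int) / 4 + 1) = wd := by omega
    rw [hhm, hwm] at hp
    have hc := hp.2.2 h (by rw [PySem.List.mem_pyRange_one]; omega)
      w (by rw [PySem.List.mem_pyRange_one]; omega)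
    exact ⟨hc.2.2.1, hc.2.2.2⟩
  obtain ⟨E, G, L⟩ := outer_eq si pal xo yo wd ni.length (PySem.List.pyRange 0 ht 1)
    ((PySem.Dict.empty : PySem.Dict Int (List Int)), ni)
    (by intro v r hv; simp [PySem.Dict.get?_empty] at hv) rfl hcond
  exact E.symm
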